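-- pv_equiv track=rewrite | github.com/MclPio/judgement-ai | judgement_ai/grader.py | _select_final_score
-- ===== SOURCE A (Python) =====
-- from collections import Counter
--
-- def _select_final_score(scores: list[int]) -> int:
--     """Select the majority score, or the middle value when tied."""
--     counts = Counter(scores)
--     top_count = max(counts.values())
--     winners = [score for score, count in counts.items() if count == top_count]
--     if len(winners) == 1:
--         return winners[0]
--
--     sorted_scores = sorted(scores)
--     return sorted_scores[len(sorted_scores) // 2]
-- ===== SOURCE B (Python) =====
-- def _select_final_score(scores: list[int]) -> int:
--     """Select the majority score, or the middle value when tied."""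
--     s = sorted(scores)
--     if not s:
--         raise ValueError("max() arg is an empty sequence")
--     best_val, best_len, tie = s[0], 0, False
--     cur_val, cur_len = s[0], 0
--     for x in s:
--         if x == cur_val:
--             cur_len += 1
--         else:
--             cur_val, cur_len = x, 1
--         if cur_len > best_len:
--             best_val, best_len, tie = cur_val, cur_len, False
--         elif cur_len == best_len:
--             tie = True
--     return s[len(s) // 2] if tie else best_val
-- ===== Notes on version B (the rewrite author's own statement) =====
-- stated objective: alternative
-- what changed: Replaces the Counter/max/winners-list pipeline by a single run-length scan over the list sorted once, tracking the best run and a tie flag, so no hash counting and no second items pass are needed.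
import Mathlib
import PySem

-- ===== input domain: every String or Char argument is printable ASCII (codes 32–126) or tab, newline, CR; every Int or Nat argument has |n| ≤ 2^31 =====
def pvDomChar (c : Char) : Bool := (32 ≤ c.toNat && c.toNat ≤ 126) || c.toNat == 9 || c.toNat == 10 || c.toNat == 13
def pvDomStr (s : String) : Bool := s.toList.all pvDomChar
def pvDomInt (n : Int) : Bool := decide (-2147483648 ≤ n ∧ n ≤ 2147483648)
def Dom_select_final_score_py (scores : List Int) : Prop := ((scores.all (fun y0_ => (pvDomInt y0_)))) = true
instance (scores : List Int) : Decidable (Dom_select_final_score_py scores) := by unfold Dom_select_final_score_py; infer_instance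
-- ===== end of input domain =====

-- B replaces A's Counter/max/winners pipeline by a single run-length scan over the sorted list (alternative decomposition, same asymptotic cost).

-- ===== PORT A =====
def select_final_score_py (scores : List Int) : Int :=
  let counts := PySem.Dict.counter scores
  let top : Int :=
    match PySem.List.max? counts.values (fun v => v) with
    | some t => t
    | none => 0    -- max() of an empty sequence raises ValueError; excluded by Pre_
  let winners := (counts.items.filter (fun p => p.2 == top)).map (fun p => p.1)
  if winners.length = 1 then
    PySem.List.pyGetD winners 0 0
  else
    let sorted_scores := PySem.List.sorted scores (fun x => x) false
    PySem.List.pyGetD sorted_scores (PySem.Int.floordiv (sorted_scores.length : Int) 2) 0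

-- ===== PORT B =====
-- one step of Source B's loop body on state (best_val, best_len, tie, cur_val, cur_len)
def pvStep (st : Int × Int × Bool × Int × Int) (x : Int) : Int × Int × Bool × Int × Int :=
  let cv' := if x = st.2.2.2.1 then st.2.2.2.1 else x
  let cl' := if x = st.2.2.2.1 then st.2.2.2.2 + 1 else 1
  if cl' > st.2.1 then (cv', cl', false, cv', cl')
  else if cl' = st.2.1 then (st.1, st.2.1, true, cv', cl')
  else (st.1, st.2.1, st.2.2.1, cv', cl')

def select_final_score_py_alt (scores : List Int) : Int :=
  let s := PySem.List.sorted scores (fun x => x) false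
  match s with
  | [] => 0    -- Source B raises ValueError on an empty list; excluded by Pre_
  | s0 :: rest =>
    let st := (s0 :: rest).foldl pvStep (s0, 0, false, s0, 0)
    if st.2.2.1 then
      PySem.List.pyGetD (s0 :: rest) (PySem.Int.floordiv ((s0 :: rest).length : Int) 2) 0
    else st.1

-- ===== PRECONDITION & SPEC =====
-- Pre_ excludes only the empty list, on which A raises ValueError (max() of an empty sequence).
def Pre_select_final_score_py (scores : List Int) : Prop := scores ≠ []
instance (scores : List Int) : Decidable (Pre_select_final_score_py scores) := by unfold Pre_select_final_score_py; infer_instance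
def pvWitness_select_final_score_py : List Int := [1, 2, 2]
def Spec_select_final_score_py (scores : List Int) (out : Int) : Prop := out = select_final_score_py_alt scores
instance (scores : List Int) (out : Int) : Decidable (Spec_select_final_score_py scores out) := by unfold Spec_select_final_score_py; infer_instance

-- ===== CLAIM (what is proved, stated in full; the proofs are below) =====
def Claim_equal_select_final_score_py : Prop := ∀ (scores : List Int), Dom_select_final_score_py scores → Pre_select_final_score_py scores → Spec_select_final_score_py scores (select_final_score_py scores)

-- ===== LEMMAS AND PROOFS =====

-- Invariant of Source B's loop after processing the (sorted) prefix p: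
-- cur_val is the max of p and cur_len its count; best_len bounds all counts, is attained by
-- best_val, and tie records whether a second value attains best_len.
def pvInv (p : List Int) (st : Int × Int × Bool × Int × Int) : Prop :=
  (∀ v ∈ p, v ≤ st.2.2.2.1) ∧ st.2.2.2.1 ∈ p ∧
  st.2.2.2.2 = (p.count st.2.2.2.1 : Int) ∧
  st.1 ∈ p ∧ (p.count st.1 : Int) = st.2.1 ∧
  (∀ v ∈ p, (p.count v : Int) ≤ st.2.1) ∧
  (st.2.2.1 = true ↔ ∃ v ∈ p, v ≠ st.1 ∧ (p.count v : Int) = st.2.1)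

lemma pvInv_intro (p : List Int) (bv bl : Int) (tie : Bool) (cv cl : Int)
    (h1 : ∀ v ∈ p, v ≤ cv) (h2 : cv ∈ p) (h3 : cl = (p.count cv : Int))
    (h4 : bv ∈ p) (h5 : (p.count bv : Int) = bl) (h6 : ∀ v ∈ p, (p.count v : Int) ≤ bl)
    (h7 : tie = true ↔ ∃ v ∈ p, v ≠ bv ∧ (p.count v : Int) = bl) :
    pvInv p (bv, bl, tie, cv, cl) := ⟨h1, h2, h3, h4, h5, h6, h7⟩

lemma pvStep_inv (p : List Int) (x : Int) (st : Int × Int × Bool × Int × Int)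
    (hinv : pvInv p st) (hle : ∀ v ∈ p, v ≤ x) : pvInv (p ++ [x]) (pvStep st x) := by
  obtain ⟨bv, bl, tie, cv, cl⟩ := st
  obtain ⟨hmax, hcv, hcl, hbv, hbvc, hbd, htie⟩ := hinv
  simp only at hmax hcv hcl hbv hbvc hbd htie
  have hcount : ∀ v : Int, (p ++ [x]).count v = p.count v + if v = x then 1 else 0 := by
    intro v; by_cases h : v = x
    · simp [List.count_append, h]
    · simp [List.count_append, h, (mt Eq.symm h : ¬ x = v)]
  have hclbl : cl ≤ bl := hcl ▸ hbd cv hcv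
  have hmemp : ∀ v ∈ p ++ [x], v ≠ x → v ∈ p := by
    intro v hv hvx; rcases List.mem_append.1 hv with h | h
    · exact h
    · exact absurd (by simpa using h) hvx
  by_cases hx : x = cv
  · subst hx
    have hstep : pvStep (bv, bl, tie, x, cl) x =
        if cl + 1 > bl then (x, cl + 1, false, x, cl + 1)
        else if cl + 1 = bl then (bv, bl, true, x, cl + 1)
        else (bv, bl, tie, x, cl + 1) := by
      simp [pvStep]
    rw [hstep]
    have hmax' : ∀ v ∈ p ++ [x], v ≤ x := by
      intro v hv; rcases List.mem_append.1 hv with h | h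
      · exact hmax v h
      · simp at h; omega
    have hcx : ((p ++ [x]).count x : Int) = cl + 1 := by rw [hcount]; simp; omega
    have hco : ∀ v, v ≠ x → ((p ++ [x]).count v : Int) = (p.count v : Int) := by
      intro v hvx; rw [hcount, if_neg hvx]; push_cast; ring
    by_cases h1 : cl + 1 > bl
    · rw [if_pos h1]
      refine pvInv_intro _ _ _ _ _ _ hmax' (by simp) hcx.symm (by simp) hcx ?_ ?_
      · intro v hv
        by_cases hvx : v = x
        · subst hvx; omega
        · rw [hco v hvx]; have := hbd v (hmemp v hv hvx); omega
      · refine iff_of_false (by simp) ?_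
        rintro ⟨v, hv, hne, hvc⟩
        have hvx : v ≠ x := fun h => hne h
        rw [hco v hvx] at hvc
        have := hbd v (hmemp v hv hvx); omega
    · rw [if_neg h1]
      have hbvx : bv ≠ x := by intro h; rw [h] at hbvc; omega
      have hcbv : ((p ++ [x]).count bv : Int) = bl := by rw [hco bv hbvx]; omega
      have hbd' : ∀ v ∈ p ++ [x], ((p ++ [x]).count v : Int) ≤ bl := by
        intro v hv
        by_cases hvx : v = x
        · subst hvx; omega
        · rw [hco v hvx]; exact hbd v (hmemp v hv hvx)
      by_cases h2 : cl + 1 = bl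
      · rw [if_pos h2]
        refine pvInv_intro _ _ _ _ _ _ hmax' (by simp) hcx.symm
          (List.mem_append_left _ hbv) hcbv hbd' ?_
        exact iff_of_true rfl ⟨x, by simp, Ne.symm hbvx, by omega⟩
      · rw [if_neg h2]
        refine pvInv_intro _ _ _ _ _ _ hmax' (by simp) hcx.symm
          (List.mem_append_left _ hbv) hcbv hbd' ?_
        rw [htie]
        constructor
        · rintro ⟨v, hv, hne, hvc⟩
          have hvx : v ≠ x := by intro h; rw [h] at hvc; omega
          exact ⟨v, List.mem_append_left _ hv, hne, by rw [hco v hvx]; omega⟩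
        · rintro ⟨v, hv, hne, hvc⟩
          by_cases hvx : v = x
          · exfalso; rw [hvx, hcx] at hvc; omega
          · rw [hco v hvx] at hvc
            exact ⟨v, hmemp v hv hvx, hne, hvc⟩
  · -- new run starting at x
    have hxp : x ∉ p := fun h => hx (le_antisymm (hmax x h) (hle cv hcv))
    have hxc0 : p.count x = 0 := List.count_eq_zero.2 hxp
    have hcvpos : 1 ≤ p.count cv := List.count_pos_iff.2 hcv
    have hbl1 : (1 : Int) ≤ bl := le_trans (by exact_mod_cast hcvpos) (hbd cv hcv)
    have hbvx : bv ≠ x := fun h => hxp (h ▸ hbv)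
    have hstep : pvStep (bv, bl, tie, cv, cl) x =
        if 1 > bl then (x, 1, false, x, 1)
        else if 1 = bl then (bv, bl, true, x, 1)
        else (bv, bl, tie, x, 1) := by
      simp [pvStep, hx]
    rw [hstep, if_neg (by omega)]
    have hmax' : ∀ v ∈ p ++ [x], v ≤ x := by
      intro v hv; rcases List.mem_append.1 hv with h | h
      · exact le_trans (hmax v h) (hle cv hcv)
      · simp at h; omega
    have hcx : ((p ++ [x]).count x : Int) = 1 := by rw [hcount]; simp [hxc0]
    have hco : ∀ v, v ≠ x → ((p ++ [x]).count v : Int) = (p.count v : Int) := by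
      intro v hvx; rw [hcount, if_neg hvx]; push_cast; ring
    have hcbv : ((p ++ [x]).count bv : Int) = bl := by rw [hco bv hbvx]; omega
    have hbd' : ∀ v ∈ p ++ [x], ((p ++ [x]).count v : Int) ≤ bl := by
      intro v hv
      by_cases hvx : v = x
      · subst hvx; omega
      · rw [hco v hvx]; exact hbd v (hmemp v hv hvx)
    by_cases h2 : 1 = bl
    · rw [if_pos h2]
      refine pvInv_intro _ _ _ _ _ _ hmax' (by simp) hcx.symm
        (List.mem_append_left _ hbv) hcbv hbd' ?_
      exact iff_of_true rfl ⟨x, by simp, Ne.symm hbvx, by omega⟩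
    · rw [if_neg h2]
      refine pvInv_intro _ _ _ _ _ _ hmax' (by simp) hcx.symm
        (List.mem_append_left _ hbv) hcbv hbd' ?_
      rw [htie]
      constructor
      · rintro ⟨v, hv, hne, hvc⟩
        have hvx : v ≠ x := fun h => hxp (h ▸ hv)
        exact ⟨v, List.mem_append_left _ hv, hne, by rw [hco v hvx]; omega⟩
      · rintro ⟨v, hv, hne, hvc⟩
        by_cases hvx : v = x
        · exfalso; rw [hvx, hcx] at hvc; omega
        · rw [hco v hvx] at hvc
          exact ⟨v, hmemp v hv hvx, hne, hvc⟩

lemma pvFold_inv (rest : List Int) (p : List Int) (st : Int × Int × Bool × Int × Int)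
    (hinv : pvInv p st) (hsorted : ∀ v ∈ p, ∀ w ∈ rest, v ≤ w)
    (hrs : rest.Pairwise (· ≤ ·)) :
    pvInv (p ++ rest) (rest.foldl pvStep st) := by
  induction rest generalizing p st with
  | nil => simpa using hinv
  | cons x rs ih =>
    simp only [List.foldl_cons]
    have h1 : pvInv (p ++ [x]) (pvStep st x) :=
      pvStep_inv p x st hinv (fun v hv => hsorted v hv x (by simp))
    have h2 : ∀ v ∈ p ++ [x], ∀ w ∈ rs, v ≤ w := by
      intro v hv w hw
      rcases List.mem_append.1 hv with h | h
      · exact hsorted v h w (by simp [hw])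
      · simp at h; subst h; exact (List.pairwise_cons.1 hrs).1 w hw
    have := ih (p ++ [x]) (pvStep st x) h1 h2 (List.pairwise_cons.1 hrs).2
    simpa using this

lemma pvNodupSingleton (l : List Int) (a : Int) (hn : l.Nodup) (ha : a ∈ l)
    (hall : ∀ x ∈ l, x = a) : l = [a] := by
  cases l with
  | nil => simp at ha
  | cons y ys =>
    have hy : y = a := hall y (by simp)
    subst hy
    cases ys with
    | nil => rfl
    | cons z zs =>
      have hz : z = y := hall z (by simp)
      subst hz
      simp at hn

theorem select_final_score_py_spec : Claim_equal_select_final_score_py := by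
  intro scores _ hne
  unfold Spec_select_final_score_py
  have hsne : PySem.List.sorted scores (fun x => x) false ≠ [] := by
    simpa [PySem.List.sorted_eq_nil_iff] using hne
  obtain ⟨s0, rest, hrep⟩ : ∃ s0 rest, PySem.List.sorted scores (fun x => x) false = s0 :: rest := by
    cases h : PySem.List.sorted scores (fun x => x) false with
    | nil => exact absurd h hsne
    | cons a l => exact ⟨a, l, rfl⟩
  have hperm : (s0 :: rest).Perm scores := by
    rw [← hrep]; exact PySem.List.sorted_perm scores (fun x => x) false
  have hpair : (s0 :: rest).Pairwise (· ≤ ·) := by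
    have h := PySem.List.sorted_pairwise scores (fun x => x)
    rw [hrep] at h; exact h
  set st := (s0 :: rest).foldl pvStep (s0, 0, false, s0, 0) with hst
  have hinv : pvInv (s0 :: rest) st := by
    rw [hst, List.foldl_cons]
    have hinv0 : pvInv [s0] (pvStep (s0, 0, false, s0, 0) s0) := by
      have hs : pvStep (s0, 0, false, s0, 0) s0 = (s0, 1, false, s0, 1) := by simp [pvStep]
      rw [hs]
      refine pvInv_intro _ _ _ _ _ _ ?_ ?_ ?_ ?_ ?_ ?_ ?_ <;> simp
    have h := pvFold_inv rest [s0] (pvStep (s0, 0, false, s0, 0) s0) hinv0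
      (by intro v hv w hw; simp at hv; subst hv; exact (List.pairwise_cons.1 hpair).1 w hw)
      (List.pairwise_cons.1 hpair).2
    simpa using h
  obtain ⟨hmaxS, hcv, hcl, hbv, hbvc, hbd, htie⟩ := hinv
  have hc : ∀ v : Int, (s0 :: rest).count v = scores.count v := fun v => hperm.count_eq v
  have hm : ∀ v : Int, v ∈ (s0 :: rest) ↔ v ∈ scores := fun v => hperm.mem_iff
  -- A side: the counter's values and the max
  have hvals : (PySem.Dict.counter scores).values
      = (PySem.Set.ofList scores).map (fun k => (scores.count k : Int)) := by
    simp [PySem.Dict.values, PySem.Dict.items_counter, List.map_map, Function.comp]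
  have hs0 : s0 ∈ PySem.Set.ofList scores := (PySem.Set.mem_ofList _ _).2 ((hm s0).1 (by simp))
  have hvne : (PySem.Dict.counter scores).values ≠ [] := by
    rw [hvals]; intro hnil
    rw [List.map_eq_nil_iff] at hnil
    rw [hnil] at hs0; simp at hs0
  obtain ⟨t, ht⟩ : ∃ t, PySem.List.max? (PySem.Dict.counter scores).values (fun v => v) = some t := by
    cases h : PySem.List.max? (PySem.Dict.counter scores).values (fun v => v) with
    | none => exact absurd ((PySem.List.max?_eq_none_iff _ _).1 h) hvne
    | some t => exact ⟨t, rfl⟩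
  have htmem : t ∈ (PySem.Dict.counter scores).values := PySem.List.max?_mem ht
  have htmax : ∀ y ∈ (PySem.Dict.counter scores).values, y ≤ t := by
    intro y hy; exact PySem.List.max?_isMax ht y hy
  have htle : t ≤ st.2.1 := by
    rw [hvals] at htmem
    obtain ⟨w, hw, hwt⟩ := List.mem_map.1 htmem
    have hws : w ∈ (s0 :: rest) := (hm w).2 ((PySem.Set.mem_ofList _ _).1 hw)
    have hb := hbd w hws
    rw [hc w] at hb; omega
  have hble : st.2.1 ≤ t := by
    have hbvs : st.1 ∈ scores := (hm _).1 hbv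
    have hmem2 : ((scores.count st.1 : Int)) ∈ (PySem.Dict.counter scores).values := by
      rw [hvals]; exact List.mem_map.2 ⟨st.1, (PySem.Set.mem_ofList _ _).2 hbvs, rfl⟩
    have h2 := htmax _ hmem2
    have h3 := hbvc; rw [hc st.1] at h3; omega
  have htbl : t = st.2.1 := le_antisymm htle hble
  -- A side: winners
  have hwinners : ((PySem.Dict.counter scores).items.filter (fun p => p.2 == t)).map (fun p => p.1)
      = (PySem.Set.ofList scores).filter (fun k => (scores.count k : Int) == t) := by
    rw [PySem.Dict.items_counter, List.filter_map, List.map_map]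
    simp [Function.comp_def]
  have hWmem : ∀ k : Int,
      k ∈ (PySem.Set.ofList scores).filter (fun k => (scores.count k : Int) == t)
        ↔ k ∈ scores ∧ (scores.count k : Int) = t := by
    intro k; simp [List.mem_filter, PySem.Set.mem_ofList]
  have hWnodup : ((PySem.Set.ofList scores).filter (fun k => (scores.count k : Int) == t)).Nodup :=
    (PySem.Set.nodup_ofList scores).filter _
  have hbvW : st.1 ∈ (PySem.Set.ofList scores).filter (fun k => (scores.count k : Int) == t) := by
    refine (hWmem st.1).2 ⟨(hm _).1 hbv, ?_⟩
    have h3 := hbvc; rw [hc st.1] at h3; omega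
  -- unfold both programs
  simp only [select_final_score_py, select_final_score_py_alt, ht, hrep, hwinners]
  rw [← hst]
  cases htv : st.2.2.1 with
  | true =>
    obtain ⟨v, hv, hvne, hvc⟩ := htie.1 htv
    have hvW : v ∈ (PySem.Set.ofList scores).filter (fun k => (scores.count k : Int) == t) := by
      refine (hWmem v).2 ⟨(hm v).1 hv, ?_⟩
      rw [← hc v]; omega
    have hlen : ((PySem.Set.ofList scores).filter (fun k => (scores.count k : Int) == t)).length ≠ 1 := by
      intro hl
      obtain ⟨z, hz⟩ := List.length_eq_one_iff.1 hl
      rw [hz] at hvW hbvW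
      simp only [List.mem_singleton] at hvW hbvW
      exact hvne (hvW.trans hbvW.symm)
    rw [if_neg hlen, if_pos rfl]
  | false =>
    have hnot : ¬ ∃ v ∈ (s0 :: rest), v ≠ st.1 ∧ ((s0 :: rest).count v : Int) = st.2.1 := by
      intro hex
      have := htie.2 hex
      rw [htv] at this; exact Bool.false_ne_true this
    have hall : ∀ z ∈ (PySem.Set.ofList scores).filter (fun k => (scores.count k : Int) == t),
        z = st.1 := by
      intro z hz
      obtain ⟨hzs, hzc⟩ := (hWmem z).1 hz
      by_contra hzz
      exact hnot ⟨z, (hm z).2 hzs, hzz, by rw [hc z]; omega⟩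
    have hW : (PySem.Set.ofList scores).filter (fun k => (scores.count k : Int) == t) = [st.1] :=
      pvNodupSingleton _ _ hWnodup hbvW hall
    rw [hW]
    simp [PySem.List.pyGetD_zero_cons]
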